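-- pv_equiv track=rewrite | github.com/GuilhermeBoia/graduation | algorithms/week2/lista2/E.py | max_k
-- ===== SOURCE A (Python) =====
-- def can_win_with_k(k, array):
--     n = len(array)
--     array = sorted(array)
--     for i in range(k):
--         threshold = k - i
--         index = -1
--         for j in range(len(array)):
--             if array[j] <= threshold:
--                 index = j
--                 break
--         if index == -1:
--             return False
--         array.pop(index)
--         if array:
--             array[-1] += threshold
--             array = sorted(array)
--     return True
--
-- def max_k(n, array):
--     left, right = 0, n
--     while left < right:
--         mid = (left + right + 1) // 2
--         if can_win_with_k(mid, array[:]):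
--             left = mid
--         else:
--             right = mid - 1
--     return left
-- ===== SOURCE B (Python) =====
-- def max_k(n, array):
--     # One sort, then each survival check runs in O(k) without mutating the array:
--     # the array stays sorted on its own, because the first element <= threshold is
--     # always the current minimum (the front) and every added threshold lands on the
--     # current maximum (the back), so a front pointer plus a running 'extra' on the
--     # back element replace pop/resort.
--     s = sorted(array)
--
--     def wins(k):
--         removed = 0
--         extra = 0
--         for i in range(k):
--             t = k - i
--             if removed == len(s):
--                 return False
--             front = s[-1] + extra if removed == len(s) - 1 else s[removed]
--             if front > t:
--                 return False
--             removed += 1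
--             if removed < len(s):
--                 extra += t
--         return True
--
--     lo, hi = 0, n
--     while lo < hi:
--         mid = (lo + hi + 1) // 2
--         if wins(mid):
--             lo = mid
--         else:
--             hi = mid - 1
--     return lo
-- ===== Notes on version B (the rewrite author's own statement) =====
-- stated objective: faster
-- what changed: B sorts once and replaces A's O(k n log n) per-check simulation (scan for an index, pop it, add to the last element, resort every round) by an O(k) check that walks a front pointer over the fixed sorted array and keeps the accumulated additions to the back element in a running counter, since the array provably stays sorted.
import Mathlib
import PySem

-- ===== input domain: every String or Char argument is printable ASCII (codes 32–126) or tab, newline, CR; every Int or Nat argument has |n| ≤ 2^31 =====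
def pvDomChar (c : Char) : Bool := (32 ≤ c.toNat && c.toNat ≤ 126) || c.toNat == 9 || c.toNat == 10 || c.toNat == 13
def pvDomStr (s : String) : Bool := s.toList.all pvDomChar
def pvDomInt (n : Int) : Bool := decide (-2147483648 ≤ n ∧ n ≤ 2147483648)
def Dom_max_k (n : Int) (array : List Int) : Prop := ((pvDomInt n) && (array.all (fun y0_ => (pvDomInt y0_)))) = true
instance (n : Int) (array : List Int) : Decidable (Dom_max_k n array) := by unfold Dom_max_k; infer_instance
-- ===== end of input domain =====

-- B sorts once and replaces A's pop/resort game simulation by an O(k) front-pointer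
-- check with a running 'extra' on the back element; equivalence is proved below.

-- ===== PORT A =====
-- inner 'for j in range(len(array)): if array[j] <= threshold: index = j; break' scan
def pvFindIdx (threshold : Int) : List Int → Int → Int
  | [], _ => -1
  | x :: xs, j => if x ≤ threshold then j else pvFindIdx threshold xs (j + 1)

-- the 'for i in range(k)' loop of can_win_with_k: i counts up while i < k
-- (fuel = number of remaining range values k - i, so range(k) is consumed lazily as in Python)
def pvWinLoop (k : Int) : Nat → Int → List Int → Bool
  | 0, _, _ => true
  | fuel + 1, i, arr =>
    let threshold := k - i
    let index := pvFindIdx threshold arr 0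
    if index = -1 then false
    else
      match PySem.List.pop? arr index with
      | none => false  -- unreachable: the scan only returns an in-range index
      | some (_, arr') =>
        -- 'if array: array[-1] += threshold; array = sorted(array)'
        let arr2 := if arr'.isEmpty then arr'
          else PySem.List.sorted (arr'.dropLast ++ [(PySem.List.pyGet? arr' (-1)).getD 0 + threshold]) (fun x => x)
        pvWinLoop k fuel (i + 1) arr2

def can_win_with_k (k : Int) (array : List Int) : Bool :=
  let _n := PySem.List.len array   -- 'n = len(array)' (unused in A)
  let arr := PySem.List.sorted array (fun x => x)
  pvWinLoop k k.toNat 0 arr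

-- the 'while left < right' binary search of max_k (fuel only makes the loop total;
-- fuel > right - left always suffices)
def pvMaxKLoop (array : List Int) : Nat → Int → Int → Int
  | 0, left, _ => left
  | fuel + 1, left, right =>
    if left < right then
      let mid := PySem.Int.floordiv (left + right + 1) 2
      if can_win_with_k mid (PySem.List.slice array none none) then pvMaxKLoop array fuel mid right
      else pvMaxKLoop array fuel left (mid - 1)
    else left

def max_k (n : Int) (array : List Int) : Int :=
  pvMaxKLoop array (n.toNat + 1) 0 n

-- ===== PORT B =====
-- Source B's inner 'wins' loop: state (i, removed, extra); fuel = k - i remaining iterations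
def pvWins (s : List Int) (k : Int) : Nat → Int → Int → Int → Bool
  | 0, _, _, _ => true
  | fuel + 1, i, removed, extra =>
    let t := k - i
    if removed = PySem.List.len s then false
    else
      -- 'front = s[-1] + extra if removed == len(s) - 1 else s[removed]'
      -- (both indices are in range here, so .getD 0 never substitutes)
      let front := if removed = PySem.List.len s - 1
        then (PySem.List.pyGet? s (-1)).getD 0 + extra
        else (PySem.List.pyGet? s removed).getD 0
      if front > t then false
      else
        let removed' := removed + 1
        let extra' := if removed' < PySem.List.len s then extra + t else extra
        pvWins s k fuel (i + 1) removed' extra'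

-- Source B's 'while lo < hi' binary search (fuel only makes the loop total)
def pvAltLoop (s : List Int) : Nat → Int → Int → Int
  | 0, lo, _ => lo
  | fuel + 1, lo, hi =>
    if lo < hi then
      let mid := PySem.Int.floordiv (lo + hi + 1) 2
      if pvWins s mid mid.toNat 0 0 0 then pvAltLoop s fuel mid hi
      else pvAltLoop s fuel lo (mid - 1)
    else lo

def max_k_alt (n : Int) (array : List Int) : Int :=
  let s := PySem.List.sorted array (fun x => x)
  pvAltLoop s (n.toNat + 1) 0 n

-- ===== PRECONDITION & SPEC =====
def Spec_max_k (n : Int) (array : List Int) (out : Int) : Prop := out = max_k_alt n array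
instance (n : Int) (array : List Int) (out : Int) : Decidable (Spec_max_k n array out) := by unfold Spec_max_k; infer_instance

-- ===== CLAIM (what is proved, stated in full; the proofs are below) =====
def Claim_equal_max_k : Prop := ∀ (n : Int) (array : List Int), Dom_max_k n array → Spec_max_k n array (max_k n array)

-- ===== LEMMAS AND PROOFS =====

-- the sorted array both programs work on
def pvS (array : List Int) : List Int := PySem.List.sorted array (fun x => x)

-- common closed-form value of both inner loops on a list xs ++ [b], m moves left
def pvSpecW : Nat → List Int → Int → Bool
  | 0, _, _ => true
  | m+1, [], b => decide (b ≤ (m : Int) + 1) && decide (m = 0)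
  | m+1, x :: xs, b => decide (x ≤ (m : Int) + 1) && pvSpecW m xs (b + ((m : Int) + 1))

lemma pvFindIdx_neg (t : Int) : ∀ (xs : List Int) (j : Int), (∀ y ∈ xs, ¬ y ≤ t) →
    pvFindIdx t xs j = -1 := by
  intro xs
  induction xs with
  | nil => intro j _; rfl
  | cons x xs ih =>
    intro j h
    simp only [pvFindIdx]
    rw [if_neg (h x (by simp))]
    exact ih _ (fun y hy => h y (by simp [hy]))

lemma pvWinLoop_nil (k i : Int) : ∀ fuel : Nat, pvWinLoop k fuel i [] = decide (fuel = 0)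
  | 0 => rfl
  | fuel + 1 => by simp [pvWinLoop, pvFindIdx]

lemma pvWinLoop_spec : ∀ (m : Nat) (xs : List Int) (b k i : Int),
    (xs ++ [b]).Pairwise (· ≤ ·) → k - i = (m : Int) →
    pvWinLoop k m i (xs ++ [b]) = pvSpecW m xs b := by
  intro m
  induction m with
  | zero => intro xs b k i _ _; rfl
  | succ m ih =>
    intro xs b k i hp hki
    have ht : k - i = (m : Int) + 1 := by push_cast at hki; omega
    cases xs with
    | nil =>
      simp only [List.nil_append] at hp ⊢
      by_cases hb : b ≤ (m : Int) + 1
      · simp only [pvWinLoop, pvFindIdx, ht, if_pos hb]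
        norm_num [PySem.List.pop?_zero_cons]
        rw [pvWinLoop_nil]
        simp [pvSpecW, hb]
      · simp only [pvWinLoop, pvFindIdx, ht, if_neg hb]
        simp only [pvSpecW]
        simp
        intro h; exact absurd h hb
    | cons x xs' =>
      have hx_le : ∀ y ∈ xs' ++ [b], x ≤ y := (List.pairwise_cons.1 hp).1
      by_cases hx : x ≤ (m : Int) + 1
      · simp only [pvWinLoop, pvFindIdx, ht, List.cons_append, if_pos hx]
        norm_num [PySem.List.pop?_zero_cons]
        have hp' : (xs' ++ [b + ((m : Int) + 1)]).Pairwise (· ≤ ·) := by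
          have hp2 : (xs' ++ [b]).Pairwise (· ≤ ·) := (List.pairwise_cons.1 hp).2
          rw [List.pairwise_append] at hp2 ⊢
          refine ⟨hp2.1, by simp, fun a ha y hy => ?_⟩
          simp at hy; subst hy
          have := hp2.2.2 a ha b (by simp)
          omega
        rw [PySem.List.sorted_eq_self_of_pairwise _ _ hp']
        rw [ih xs' (b + ((m : Int) + 1)) k (i + 1) hp' (by omega)]
        simp [pvSpecW, hx]
      · have hfind : pvFindIdx ((m : Int) + 1) (x :: (xs' ++ [b])) 0 = -1 := by
          simp only [pvFindIdx, if_neg hx]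
          exact pvFindIdx_neg _ _ _ (fun y hy hyt => hx (le_trans (hx_le y hy) hyt))
        simp only [pvWinLoop, ht, List.cons_append, hfind]
        simp [pvSpecW, hx]

lemma pvWins_done (s : List Int) (k : Int) :
    ∀ (fuel : Nat) (i extra : Int),
      pvWins s k fuel i (PySem.List.len s) extra = decide (fuel = 0) := by
  intro fuel
  cases fuel with
  | zero => intro i extra; rfl
  | succ fuel => intro i extra; simp [pvWins]

lemma pvWins_spec (s : List Int) : ∀ (m : Nat) (xs : List Int) (b : Int) (r : Nat)
    (k i extra : Int), s.drop r = xs ++ [b] → k - i = (m : Int) →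
    pvWins s k m i (r : Int) extra = pvSpecW m xs (b + extra) := by
  intro m
  induction m with
  | zero => intro xs b r k i extra _ _; rfl
  | succ m ih =>
    intro xs b r k i extra hdrop hki
    have ht : k - i = (m : Int) + 1 := by push_cast at hki; omega
    have hlen : s.length = r + xs.length + 1 := by
      have h1 : (s.drop r).length = xs.length + 1 := by rw [hdrop]; simp
      have h2 : r < s.length := by
        by_contra h
        rw [List.drop_eq_nil_of_le (by omega)] at hdrop
        exact absurd hdrop (by simp)
      simp [List.length_drop] at h1
      omega
    cases xs with
    | nil =>
      -- r = len s - 1; the single remaining element is b = s.getLast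
      have hr : r + 1 = s.length := by simp at hlen; omega
      have hs : s = s.take r ++ [b] := by
        conv_lhs => rw [← List.take_append_drop r s]
        rw [hdrop]; simp
      have hlast : PySem.List.pyGet? s (-1) = some b := by
        rw [hs]; exact PySem.List.pyGet?_neg_one_append_singleton _ _
      simp only [pvWins, PySem.List.len_eq, ht]
      rw [if_neg (by omega : ¬ ((r : Nat) : Int) = (s.length : Int))]
      rw [if_pos (by omega : ((r : Nat) : Int) = (s.length : Int) - 1)]
      rw [hlast]
      simp only [Option.getD_some]
      by_cases hb : b + extra > (m : Int) + 1
      · rw [if_pos hb]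
        simp [pvSpecW]; omega
      · rw [if_neg hb]
        rw [if_neg (by omega : ¬ ((r : Nat) : Int) + 1 < (s.length : Int))]
        have : ((r : Nat) : Int) + 1 = (PySem.List.len s : Int) := by
          simp [PySem.List.len_eq]; omega
        rw [this, pvWins_done]
        simp [pvSpecW]; omega
    | cons x xs' =>
      -- r < len s - 1; the front element is s[r] = x
      have hr2 : r + 2 ≤ s.length := by simp at hlen; omega
      have hget : s[r]? = some x := by
        have h0 : (s.drop r)[0]? = some x := by rw [hdrop]; rfl
        rw [List.getElem?_drop] at h0
        simpa using h0
      simp only [pvWins, PySem.List.len_eq, ht]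
      rw [if_neg (by omega : ¬ ((r : Nat) : Int) = (s.length : Int))]
      rw [if_neg (by omega : ¬ ((r : Nat) : Int) = (s.length : Int) - 1)]
      rw [PySem.List.pyGet?_natCast, hget]
      simp only [Option.getD_some]
      by_cases hx : x > (m : Int) + 1
      · rw [if_pos hx]
        simp [pvSpecW]; omega
      · rw [if_neg hx]
        rw [if_pos (by omega : ((r : Nat) : Int) + 1 < (s.length : Int))]
        have hcast : ((r : Nat) : Int) + 1 = (((r + 1 : Nat) : Nat) : Int) := by push_cast; ring
        have hdrop' : s.drop (r + 1) = xs' ++ [b] := by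
          rw [← List.drop_drop, hdrop]
          rfl
        rw [hcast, ih xs' b (r + 1) k (i + 1) (extra + ((m : Int) + 1)) hdrop' (by omega)]
        simp only [pvSpecW]
        rw [decide_eq_true (by omega : x ≤ (m : Int) + 1)]
        rw [show b + extra + ((m : Int) + 1) = b + (extra + ((m : Int) + 1)) from by ring]
        simp

-- the two inner checks agree for every k
lemma canwin_eq_wins (array : List Int) (k : Int) :
    can_win_with_k k array = pvWins (pvS array) k k.toNat 0 0 0 := by
  by_cases hk : k ≤ 0
  · unfold can_win_with_k
    rw [show k.toNat = 0 from by omega]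
    rfl
  rcases List.eq_nil_or_concat (pvS array) with hnil | ⟨xs, b, hcat⟩
  · unfold can_win_with_k
    rw [show k.toNat = (k.toNat - 1) + 1 from by omega]
    rw [show PySem.List.sorted array (fun x => x) = pvS array from rfl, hnil, pvWinLoop_nil]
    simp [pvWins]
  · rw [List.concat_eq_append] at hcat
    have hp : (xs ++ [b]).Pairwise (· ≤ ·) := by
      have := PySem.List.sorted_pairwise array (fun x => x)
      rw [show PySem.List.sorted array (fun x => x) = pvS array from rfl, hcat] at this
      simpa using this
    unfold can_win_with_k
    rw [show PySem.List.sorted array (fun x => x) = pvS array from rfl, hcat]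
    rw [pvWinLoop_spec k.toNat xs b k 0 hp (by omega)]
    have hw := pvWins_spec (xs ++ [b]) k.toNat xs b 0 k 0 0 (by simp) (by omega)
    norm_num at hw
    exact hw.symm

-- the two binary searches agree step for step
lemma loops_eq (array : List Int) : ∀ (fuel : Nat) (lo hi : Int),
    pvMaxKLoop array fuel lo hi = pvAltLoop (pvS array) fuel lo hi := by
  intro fuel
  induction fuel with
  | zero => intro lo hi; rfl
  | succ fuel ih =>
    intro lo hi
    simp only [pvMaxKLoop, pvAltLoop, PySem.List.slice_none_none]
    rw [canwin_eq_wins array]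
    split_ifs <;> simp [ih]

-- ===== VERDICT (by name: the statement is the Claim_ definition above) =====
theorem max_k_spec : Claim_equal_max_k := by
  intro n array _
  unfold Spec_max_k max_k max_k_alt
  exact loops_eq array (n.toNat + 1) 0 n
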